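-- pv_equiv track=rewrite | github.com/ForDevs-Fatec/for-devs-pln | funcoes/correcao_ortografica.py | remover_duplicidade
-- ===== SOURCE A (Python) =====
-- def remover_duplicidade(texto):
--     texto_sem_duplicidade = texto
--     if len(texto) > 1:
--         texto_sem_duplicidade = texto[0]
--         quantidade_duplicados_consoantes = 0
--         vogais = ['a', 'e', 'i', 'o', 'u']
--         for i in range(1, len(texto)):
--             if texto[i] != texto[i - 1]:
--                 texto_sem_duplicidade += texto[i]
--                 quantidade_duplicados_consoantes = 0
--             else:
--                 if texto[i] not in vogais and quantidade_duplicados_consoantes < 2: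
--                     texto_sem_duplicidade += texto[i]
--                     quantidade_duplicados_consoantes += 1
--     return texto_sem_duplicidade
-- ===== SOURCE B (Python) =====
-- def remover_duplicidade(texto):
--     # Run-length decomposition: scan maximal runs of identical chars;
--     # emit 1 copy for a vowel run, min(run length, 3) copies for a consonant run.
--     pieces = []
--     i = 0
--     n = len(texto)
--     while i < n:
--         j = i
--         while j < n and texto[j] == texto[i]:
--             j += 1
--         c = texto[i]
--         pieces.append(c if c in 'aeiou' else c * min(j - i, 3))
--         i = j
--     return ''.join(pieces)
-- ===== Notes on version B (the rewrite author's own statement) =====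
-- stated objective: simpler
-- what changed: Replaced the per-character previous-char/consonant-counter state machine by a run-length decomposition: split the string into maximal runs and emit 1 copy for a vowel run and min(L,3) copies for a consonant run.
import Mathlib
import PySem

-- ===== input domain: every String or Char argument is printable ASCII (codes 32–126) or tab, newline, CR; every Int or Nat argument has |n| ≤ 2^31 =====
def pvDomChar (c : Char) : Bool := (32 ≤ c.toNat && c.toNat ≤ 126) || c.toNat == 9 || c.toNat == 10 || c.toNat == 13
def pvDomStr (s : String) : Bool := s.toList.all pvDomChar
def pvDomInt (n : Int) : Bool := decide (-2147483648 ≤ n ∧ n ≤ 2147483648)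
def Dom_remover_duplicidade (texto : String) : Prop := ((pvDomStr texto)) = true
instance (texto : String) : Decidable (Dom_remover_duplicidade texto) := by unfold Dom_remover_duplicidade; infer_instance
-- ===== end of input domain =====

-- B replaces A's per-character previous-char/consonant-counter state machine by a
-- run-length decomposition (emit 1 copy per vowel run, min(L,3) per consonant run); same cost.


-- ===== PORT A =====
-- A's index loop: fold over range(1, len(texto)) carrying (accumulated chars, consonant-dup counter).
def remover_duplicidade (texto : String) : String :=
  if 1 < PySem.Str.len texto then
    let cs := texto.toList
    let st :=
      (PySem.List.pyRange 1 (PySem.Str.len texto) 1).foldl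
        (fun (st : List Char × Int) i =>
          if PySem.List.pyGetD cs i ' ' ≠ PySem.List.pyGetD cs (i - 1) ' ' then
            (st.1 ++ [PySem.List.pyGetD cs i ' '], 0)
          else if PySem.List.pyGetD cs i ' ' ∉ ['a', 'e', 'i', 'o', 'u'] ∧ st.2 < 2 then
            (st.1 ++ [PySem.List.pyGetD cs i ' '], st.2 + 1)
          else st)
        ([PySem.List.pyGetD cs 0 ' '], 0)
    String.ofList st.1
  else texto

-- ===== PORT B =====
-- length of the maximal run of c at the front of the list, and the remainder (Source B's inner while loop)
def pvTakeRun (c : Char) : List Char → Nat × List Char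
  | [] => (0, [])
  | d :: rest =>
    if d = c then
      let p := pvTakeRun c rest
      (p.1 + 1, p.2)
    else (0, d :: rest)

theorem pvTakeRun_len_le (c : Char) (l : List Char) : (pvTakeRun c l).2.length ≤ l.length := by
  induction l with
  | nil => simp [pvTakeRun]
  | cons d rest ih =>
    by_cases h : d = c <;> simp [pvTakeRun, h]
    omega

-- Source B's outer while loop: one piece per maximal run
def pvEmitRuns : List Char → List Char
  | [] => []
  | c :: rest =>
    let p := pvTakeRun c rest
    (if c ∈ ['a', 'e', 'i', 'o', 'u'] then [c] else List.replicate (min (p.1 + 1) 3) c)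
      ++ pvEmitRuns p.2
termination_by l => l.length
decreasing_by
  have := pvTakeRun_len_le c rest
  simp only [List.length_cons]
  omega

def remover_duplicidade_alt (texto : String) : String :=
  String.ofList (pvEmitRuns texto.toList)

-- ===== PRECONDITION & SPEC =====
def Spec_remover_duplicidade (texto : String) (out : String) : Prop := out = remover_duplicidade_alt texto
instance (texto : String) (out : String) : Decidable (Spec_remover_duplicidade texto out) := by unfold Spec_remover_duplicidade; infer_instance

-- ===== CLAIM (what is proved, stated in full; the proofs are below) =====
def Claim_equal_remover_duplicidade : Prop := ∀ (texto : String), Dom_remover_duplicidade texto → Spec_remover_duplicidade texto (remover_duplicidade texto)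

-- ===== LEMMAS AND PROOFS =====

-- equation lemmas for the well-founded pvEmitRuns
theorem pvEmitRuns_nil : pvEmitRuns [] = [] := by rw [pvEmitRuns]

theorem pvEmitRuns_cons (c : Char) (rest : List Char) :
    pvEmitRuns (c :: rest) =
      (if c ∈ ['a', 'e', 'i', 'o', 'u'] then [c]
       else List.replicate (min ((pvTakeRun c rest).1 + 1) 3) c) ++ pvEmitRuns (pvTakeRun c rest).2 := by
  rw [pvEmitRuns]

-- A's loop as structural recursion: prev = previous char, cnt = consonant-dup counter
def pvLoopA (prev : Char) (cnt : Int) : List Char → List Char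
  | [] => []
  | c :: rest =>
    if c ≠ prev then c :: pvLoopA c 0 rest
    else if c ∉ ['a', 'e', 'i', 'o', 'u'] ∧ cnt < 2 then c :: pvLoopA c (cnt + 1) rest
    else pvLoopA prev cnt rest

-- what pvLoopA emits while still inside a run of c, given the counter
def pvEmitN (c : Char) (cnt : Int) (k : Nat) : Nat :=
  if c ∈ ['a', 'e', 'i', 'o', 'u'] then 0 else min k (2 - cnt).toNat

theorem pvLoopA_eq_runs (l : List Char) : ∀ (c : Char) (cnt : Int),
    pvLoopA c cnt l =
      List.replicate (pvEmitN c cnt (pvTakeRun c l).1) c ++ pvEmitRuns (pvTakeRun c l).2 := by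
  induction l with
  | nil => intro c cnt; simp [pvLoopA, pvTakeRun, pvEmitN, pvEmitRuns_nil]
  | cons d rest ih =>
    intro c cnt
    by_cases hdc : d = c
    · subst hdc
      by_cases hv : d ∈ ['a', 'e', 'i', 'o', 'u']
      · simp [pvLoopA, pvTakeRun, pvEmitN, hv, ih]
      · by_cases hcnt : cnt < 2
        · have h1 : pvEmitN d cnt ((pvTakeRun d rest).1 + 1)
              = pvEmitN d (cnt + 1) (pvTakeRun d rest).1 + 1 := by
            simp only [pvEmitN, if_neg hv]
            omega
          simp [pvLoopA, pvTakeRun, hv, hcnt, ih, h1, List.replicate_succ]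
        · have h1 : pvEmitN d cnt ((pvTakeRun d rest).1 + 1) = pvEmitN d cnt (pvTakeRun d rest).1 := by
            simp only [pvEmitN, if_neg hv]
            omega
          simp [pvLoopA, pvTakeRun, hv, hcnt, ih, h1]
    · rw [pvLoopA, if_pos (by exact hdc), pvTakeRun, if_neg hdc, ih]
      have h0 : pvEmitN c cnt 0 = 0 := by simp [pvEmitN]
      rw [h0]
      rw [pvEmitRuns_cons]
      by_cases hv : d ∈ ['a', 'e', 'i', 'o', 'u']
      · simp [pvEmitN, hv]
      · have h1 : min (pvTakeRun d rest).1 2 + 1 = min ((pvTakeRun d rest).1 + 1) 3 := by omega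
        simp [pvEmitN, hv, ← h1, List.replicate_succ]

theorem pvCons_loopA (c : Char) (rest : List Char) :
    c :: pvLoopA c 0 rest = pvEmitRuns (c :: rest) := by
  rw [pvLoopA_eq_runs, pvEmitRuns_cons]
  by_cases hv : c ∈ ['a', 'e', 'i', 'o', 'u']
  · simp [pvEmitN, hv]
  · have h1 : min (pvTakeRun c rest).1 2 + 1 = min ((pvTakeRun c rest).1 + 1) 3 := by omega
    simp [pvEmitN, hv, ← h1, List.replicate_succ]

-- A's index fold, from position k with k ≥ 1, equals pvLoopA on the dropped suffix
theorem pvFoldA_eq (cs : List Char) : ∀ (n k : Nat), k ≥ 1 → cs.length = k + n →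
    ∀ (acc : List Char) (cnt : Int),
    ((PySem.List.pyRange (k : Int) (cs.length : Int) 1).foldl
        (fun (st : List Char × Int) i =>
          if PySem.List.pyGetD cs i ' ' ≠ PySem.List.pyGetD cs (i - 1) ' ' then
            (st.1 ++ [PySem.List.pyGetD cs i ' '], 0)
          else if PySem.List.pyGetD cs i ' ' ∉ ['a', 'e', 'i', 'o', 'u'] ∧ st.2 < 2 then
            (st.1 ++ [PySem.List.pyGetD cs i ' '], st.2 + 1)
          else st)
        (acc, cnt)).1
      = acc ++ pvLoopA (cs.getD (k - 1) ' ') cnt (cs.drop k) := by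
  intro n
  induction n with
  | zero =>
    intro k hk hlen acc cnt
    rw [PySem.List.pyRange_one_eq_nil (by omega)]
    have hd : List.drop k cs = [] := List.drop_eq_nil_of_le (by omega)
    rw [hd]
    simp [pvLoopA]
  | succ m ih =>
    intro k hk hlen acc cnt
    have hklt : k < cs.length := by omega
    rw [PySem.List.pyRange_one_cons (by exact_mod_cast hklt)]
    have hcast : ((k : Int) + 1) = ((k + 1 : Nat) : Int) := by push_cast; ring
    have hgetk : PySem.List.pyGetD cs (k : Int) ' ' = cs[k] := by
      rw [PySem.List.pyGetD_natCast]; exact List.getD_eq_getElem cs ' ' hklt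
    have hgetk1 : PySem.List.pyGetD cs ((k : Int) - 1) ' ' = cs.getD (k - 1) ' ' := by
      have : ((k : Int) - 1) = ((k - 1 : Nat) : Int) := by omega
      rw [this, PySem.List.pyGetD_natCast]
    have hdrop : cs.drop k = cs[k] :: cs.drop (k + 1) := List.drop_eq_getElem_cons hklt
    rw [List.foldl_cons, hcast]
    by_cases hne : cs[k] ≠ cs.getD (k - 1) ' '
    · rw [if_pos (by rw [hgetk, hgetk1]; exact hne)]
      rw [ih (k + 1) (by omega) (by omega)]
      rw [hdrop, pvLoopA, if_pos hne]
      simp [List.getD, List.getElem?_eq_getElem hklt]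
    · simp only [ne_eq, not_not] at hne
      rw [if_neg (by rw [hgetk, hgetk1]; simp [hne])]
      by_cases hbr : cs[k] ∉ ['a', 'e', 'i', 'o', 'u'] ∧ cnt < 2
      · rw [if_pos (by rw [hgetk]; exact hbr)]
        rw [ih (k + 1) (by omega) (by omega)]
        rw [hdrop, pvLoopA, if_neg (by simp [hne]), if_pos hbr]
        simp [List.getD, List.getElem?_eq_getElem hklt]
      · rw [if_neg (by rw [hgetk]; exact hbr)]
        rw [ih (k + 1) (by omega) (by omega)]
        rw [hdrop, pvLoopA, if_neg (by simp [hne]), if_neg hbr]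
        simp [List.getD, List.getElem?_eq_getElem hklt, hne]

-- ===== VERDICT (by name: the statement is the Claim_ definition above) =====
theorem remover_duplicidade_spec : Claim_equal_remover_duplicidade := by
  intro texto _
  unfold Spec_remover_duplicidade remover_duplicidade remover_duplicidade_alt
  by_cases h : 1 < PySem.Str.len texto
  · rw [if_pos h]
    have hlen : 1 < texto.toList.length := by
      have := PySem.Str.len_eq texto; omega
    obtain ⟨c, rest, hcr⟩ : ∃ c rest, texto.toList = c :: rest := by
      cases hc : texto.toList with
      | nil => rw [hc] at hlen; simp at hlen
      | cons a b => exact ⟨a, b, rfl⟩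
    simp only [PySem.Str.len_eq, hcr]
    have hfold := pvFoldA_eq (c :: rest) rest.length 1 (le_refl 1) (by rw [List.length_cons]; omega)
      [PySem.List.pyGetD (c :: rest) 0 ' '] 0
    simp only [Nat.cast_one] at hfold
    rw [hfold]
    simp [PySem.List.pyGetD_zero_cons, List.getD, pvCons_loopA]
  · rw [if_neg h]
    have hle : texto.toList.length ≤ 1 := by
      have := PySem.Str.len_eq texto; omega
    cases hc : texto.toList with
    | nil =>
      conv_lhs => rw [← String.ofList_toList (s := texto)]
      rw [hc, pvEmitRuns_nil]
    | cons a b =>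
      have hb : b = [] := by rw [hc] at hle; simp at hle; exact hle
      conv_lhs => rw [← String.ofList_toList (s := texto)]
      rw [hc, hb, pvEmitRuns_cons]
      by_cases hv : a ∈ ['a', 'e', 'i', 'o', 'u'] <;>
        simp [hv, pvTakeRun, pvEmitRuns_nil]
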